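-- pv_equiv track=rewrite | github.com/youngkwangjoo/codingTest | 프로그래머스/0/181884. n보다 커질 때까지 더하기/n보다 커질 때까지 더하기.py | solution
-- ===== SOURCE A (Python) =====
-- def solution(numbers, n):
--     answer = 0
--     result = []
--     for i in numbers:
--         if answer <= n:
--             answer += i
--         else:
--             return answer
--     return answer
-- ===== SOURCE B (Python) =====
-- def solution(numbers, n):
--     # Two-phase: build all prefix sums first, then scan for the first
--     # pre-add prefix that exceeds n; fall back to the full total.
--     prefixes = [0]
--     for x in numbers:
--         prefixes.append(prefixes[-1] + x)
--     return next((p for p in prefixes[:-1] if p > n), prefixes[-1])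
-- ===== Notes on version B (the rewrite author's own statement) =====
-- stated objective: alternative
-- what changed: Replaces A's single accumulator loop with early return by a two-phase decomposition: materialise all prefix sums (leading 0 included), then scan the pre-add prefixes for the first value exceeding n, defaulting to the total.
import Mathlib
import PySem

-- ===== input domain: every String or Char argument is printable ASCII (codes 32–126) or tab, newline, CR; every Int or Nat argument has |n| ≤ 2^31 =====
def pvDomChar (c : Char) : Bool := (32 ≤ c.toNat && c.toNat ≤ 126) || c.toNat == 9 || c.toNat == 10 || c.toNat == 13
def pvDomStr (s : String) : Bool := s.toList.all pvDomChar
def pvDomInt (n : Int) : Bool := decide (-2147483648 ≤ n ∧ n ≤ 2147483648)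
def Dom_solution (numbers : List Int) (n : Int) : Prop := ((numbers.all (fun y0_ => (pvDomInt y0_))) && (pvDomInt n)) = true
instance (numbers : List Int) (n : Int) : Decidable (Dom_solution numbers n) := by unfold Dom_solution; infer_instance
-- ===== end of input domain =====

-- B is an alternative two-phase decomposition (build prefix sums, then scan); same values as A everywhere.

-- ===== PORT A =====
-- the for-loop with accumulator `answer` and early return
def solutionLoop (n : Int) : List Int → Int → Int
  | [], answer => answer
  | i :: rest, answer => if answer ≤ n then solutionLoop n rest (answer + i) else answer

def solution (numbers : List Int) (n : Int) : Int := solutionLoop n numbers 0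

-- ===== PORT B =====
-- phase 1 of Source B: the list `prefixes` (each element = previous last + x, starting from 0)
def altPrefixes (a : Int) : List Int → List Int
  | [] => [a]
  | x :: xs => a :: altPrefixes (a + x) xs

-- phase 2 of Source B: first element of prefixes[:-1] with p > n, else prefixes[-1]
def solution_alt (numbers : List Int) (n : Int) : Int :=
  let prefixes := altPrefixes 0 numbers
  match prefixes.dropLast.find? (fun p => decide (p > n)) with
  | some p => p
  | none => prefixes.getLastD 0

-- ===== PRECONDITION & SPEC =====
def Spec_solution (numbers : List Int) (n : Int) (out : Int) : Prop := out = solution_alt numbers n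
instance (numbers : List Int) (n : Int) (out : Int) : Decidable (Spec_solution numbers n out) := by unfold Spec_solution; infer_instance

-- ===== CLAIM (what is proved, stated in full; the proofs are below) =====
def Claim_equal_solution : Prop := ∀ (numbers : List Int) (n : Int), Dom_solution numbers n → Spec_solution numbers n (solution numbers n)

-- ===== LEMMAS AND PROOFS =====
theorem getLast?_cons_ne_nil (a : Int) (l : List Int) (h : l ≠ []) :
    (a :: l).getLast? = l.getLast? := by
  cases l with
  | nil => exact absurd rfl h
  | cons b t => exact List.getLast?_cons_cons ..

theorem altPrefixes_ne_nil (a : Int) (xs : List Int) : altPrefixes a xs ≠ [] := by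
  cases xs <;> simp [altPrefixes]

theorem loop_eq_scan (n : Int) (xs : List Int) (a : Int) :
    solutionLoop n xs a =
      (match (altPrefixes a xs).dropLast.find? (fun p => decide (p > n)) with
       | some p => p
       | none => (altPrefixes a xs).getLastD 0) := by
  induction xs generalizing a with
  | nil => simp [solutionLoop, altPrefixes]
  | cons x rest ih =>
    have hne := altPrefixes_ne_nil (a + x) rest
    by_cases h : a ≤ n
    · simp only [solutionLoop, if_pos h, ih]
      have h1 : altPrefixes a (x :: rest) = a :: altPrefixes (a + x) rest := rfl
      have h2 : (a :: altPrefixes (a + x) rest).getLastD 0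
          = (altPrefixes (a + x) rest).getLastD 0 := by
        rw [List.getLastD_eq_getLast?, List.getLastD_eq_getLast?,
          getLast?_cons_ne_nil _ _ hne]
      rw [h1, List.dropLast_cons_of_ne_nil hne,
        List.find?_cons_of_neg (by simp; omega), h2]
    · have hgt : a > n := by omega
      simp [solutionLoop, altPrefixes, h, List.dropLast_cons_of_ne_nil hne,
        hgt]

-- ===== VERDICT (by name: the statement is the Claim_ definition above) =====
theorem solution_spec : Claim_equal_solution := by
  intro numbers n _
  unfold Spec_solution solution solution_alt
  exact loop_eq_scan n numbers 0
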